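-- pv_equiv track=rewrite | github.com/diqp2001/base_infrastructure | src/infrastructure/repositories/ibkr_repo/finance/financial_assets/crypto_repository.py | _parse_crypto_symbol
-- ===== SOURCE A (Python) =====
-- def _parse_crypto_symbol(symbol: str) -> tuple[str, str]:
--     """
--     Parse cryptocurrency symbol into base and quote currencies.
--
--     Args:
--         symbol: Crypto symbol (e.g., 'BTCUSD', 'ETHUSD', 'BTC')
--
--     Returns:
--         Tuple of (base_crypto, quote_currency)
--     """
--     # Common crypto symbols
--     crypto_symbols = {
--         'BTC', 'ETH', 'LTC', 'BCH', 'XRP', 'ADA', 'DOT', 'LINK',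
--         'BNB', 'SOL', 'AVAX', 'MATIC', 'UNI', 'ATOM', 'ALGO',
--         'XLM', 'VET', 'ICP', 'FIL', 'THETA', 'AAVE', 'MKR'
--     }
--
--     # If it's just a crypto symbol, assume USD pairing
--     if symbol.upper() in crypto_symbols:
--         return symbol.upper(), 'USD'
--
--     # Try to parse combined symbol
--     for crypto in crypto_symbols:
--         if symbol.upper().startswith(crypto):
--             remainder = symbol[len(crypto):].upper()
--             if remainder in ['USD', 'EUR', 'GBP', 'JPY']:
--                 return crypto, remainder
--
--     # Default fallback
--     if len(symbol) > 3:
--         return symbol[:3].upper(), symbol[3:].upper()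
--     else:
--         return symbol.upper(), 'USD'
-- ===== SOURCE B (Python) =====
-- def _parse_crypto_symbol(symbol: str) -> tuple[str, str]:
--     """Loop-free parse: since every quote currency is exactly 3 characters long,
--     a combined symbol can only split at position len-3; test that single split
--     instead of scanning the crypto set by prefix."""
--     crypto_symbols = {
--         'BTC', 'ETH', 'LTC', 'BCH', 'XRP', 'ADA', 'DOT', 'LINK',
--         'BNB', 'SOL', 'AVAX', 'MATIC', 'UNI', 'ATOM', 'ALGO',
--         'XLM', 'VET', 'ICP', 'FIL', 'THETA', 'AAVE', 'MKR'
--     }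
--     upper = symbol.upper()
--     if upper in crypto_symbols:
--         return upper, 'USD'
--     base, quote = upper[:-3], upper[-3:]
--     if base in crypto_symbols and quote in ('USD', 'EUR', 'GBP', 'JPY'):
--         return base, quote
--     if len(upper) > 3:
--         return upper[:3], upper[3:]
--     return upper, 'USD'
-- ===== Notes on version B (the rewrite author's own statement) =====
-- stated objective: simpler
-- what changed: B is loop-free: because every quote currency is exactly 3 characters, a combined symbol can only split at position len-3, so B tests that single split (upper[:-3] in the crypto set and upper[-3:] in the quote tuple) instead of A's 22-way prefix scan of the crypto set with a remainder check; same first branch and fallback.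
import Mathlib
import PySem

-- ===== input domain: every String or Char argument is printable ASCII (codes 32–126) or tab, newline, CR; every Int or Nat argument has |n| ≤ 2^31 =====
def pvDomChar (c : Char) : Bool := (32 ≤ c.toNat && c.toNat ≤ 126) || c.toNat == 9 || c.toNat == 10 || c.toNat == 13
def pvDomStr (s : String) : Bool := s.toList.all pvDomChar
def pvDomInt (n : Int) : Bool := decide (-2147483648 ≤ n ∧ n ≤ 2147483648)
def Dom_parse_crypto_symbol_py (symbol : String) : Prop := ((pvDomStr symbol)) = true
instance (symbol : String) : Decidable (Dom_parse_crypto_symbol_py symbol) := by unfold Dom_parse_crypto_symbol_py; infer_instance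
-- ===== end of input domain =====

-- B is loop-free: every quote currency has 3 characters, so a combined symbol can
-- only split at position len-3; B tests that one split instead of A's prefix scan
-- over the 22-element crypto set (objective: simpler).

-- ===== PORT A =====
-- the crypto set, in the source's written order; the prefix loop's result does not
-- depend on the iteration order (at most one crypto can match — see pvLoopA_char)
def pvCryptos : List String :=
  ["BTC", "ETH", "LTC", "BCH", "XRP", "ADA", "DOT", "LINK",
   "BNB", "SOL", "AVAX", "MATIC", "UNI", "ATOM", "ALGO",
   "XLM", "VET", "ICP", "FIL", "THETA", "AAVE", "MKR"]
def pvCryptoSet : PySem.Set String := PySem.Set.ofList pvCryptos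
def pvQuotes : List String := ["USD", "EUR", "GBP", "JPY"]

-- 'for crypto in crypto_symbols: …' with its early returns
def pvLoopA (symbol : String) : List String → Option (String × String)
  | [] => none
  | crypto :: rest =>
      if PySem.Str.startswith (PySem.Str.upper symbol) crypto then
        let remainder := PySem.Str.upper (PySem.Str.slice symbol (some ((PySem.Str.len crypto : Int))) none)
        if remainder ∈ pvQuotes then some (crypto, remainder) else pvLoopA symbol rest
      else pvLoopA symbol rest

def parse_crypto_symbol_py (symbol : String) : String × String :=
  if PySem.Set.contains pvCryptoSet (PySem.Str.upper symbol) then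
    (PySem.Str.upper symbol, "USD")
  else
    match pvLoopA symbol pvCryptos with
    | some p => p
    | none =>
        if 3 < PySem.Str.len symbol then
          (PySem.Str.upper (PySem.Str.slice symbol none (some 3)),
           PySem.Str.upper (PySem.Str.slice symbol (some 3) none))
        else (PySem.Str.upper symbol, "USD")

-- ===== PORT B =====
-- loop-free: one split at position len-3 (upper[:-3] / upper[-3:])
def parse_crypto_symbol_py_alt (symbol : String) : String × String :=
  let upper := PySem.Str.upper symbol
  if PySem.Set.contains pvCryptoSet upper then (upper, "USD")
  else
    let base := PySem.Str.slice upper none (some (-3))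
    let quote := PySem.Str.slice upper (some (-3)) none
    if PySem.Set.contains pvCryptoSet base && ["USD", "EUR", "GBP", "JPY"].contains quote then
      (base, quote)
    else if 3 < PySem.Str.len upper then
      (PySem.Str.slice upper none (some 3), PySem.Str.slice upper (some 3) none)
    else (upper, "USD")

-- ===== PRECONDITION & SPEC =====
def Spec_parse_crypto_symbol_py (symbol : String) (out : String × String) : Prop := out = parse_crypto_symbol_py_alt symbol
instance (symbol : String) (out : String × String) : Decidable (Spec_parse_crypto_symbol_py symbol out) := by unfold Spec_parse_crypto_symbol_py; infer_instance

-- ===== CLAIM (what is proved, stated in full; the proofs are below) =====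
def Claim_equal_parse_crypto_symbol_py : Prop := ∀ (symbol : String), Dom_parse_crypto_symbol_py symbol → Spec_parse_crypto_symbol_py symbol (parse_crypto_symbol_py symbol)

-- ===== LEMMAS AND PROOFS =====

-- the upper-cased symbol as a char list, its candidate base (all but the last 3
-- chars) and candidate quote (the last 3 chars)
def pvU (symbol : String) : List Char := (PySem.Str.upper symbol).toList
def pvT (symbol : String) : List Char := (pvU symbol).take ((pvU symbol).length - 3)
def pvD (symbol : String) : List Char := (pvU symbol).drop ((pvU symbol).length - 3)

lemma pv_upper_drop (xs : List Char) (k : Nat) :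
    PySem.Chars.upper (xs.drop k) = (PySem.Chars.upper xs).drop k := by
  simp [PySem.Chars.upper, List.map_drop]

lemma pv_upper_take (xs : List Char) (k : Nat) :
    PySem.Chars.upper (xs.take k) = (PySem.Chars.upper xs).take k := by
  simp [PySem.Chars.upper, List.map_take]

lemma pv_quotes_len {q : String} (hq : q ∈ pvQuotes) : q.toList.length = 3 := by
  fin_cases hq <;> decide

-- A's remainder is the last (length - |crypto|) chars of the upper-cased symbol
lemma pv_remainderA (symbol c : String) :
    (PySem.Str.upper (PySem.Str.slice symbol (some ((PySem.Str.len c : Int))) none)).toList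
      = (pvU symbol).drop c.toList.length := by
  simp [pvU, PySem.Str.slice, PySem.List.slice_from_natCast, pv_upper_drop,
    PySem.Str.len_eq]

-- the remainder A computes, as a string, once the matching crypto is the all-but-last-3 prefix
lemma pv_remainder_eq (symbol c : String)
    (hkn : c.toList.length = (pvU symbol).length - 3) :
    PySem.Str.upper (PySem.Str.slice symbol (some ((PySem.Str.len c : Int))) none)
      = String.ofList (pvD symbol) := by
  rw [← String.ofList_toList (s := PySem.Str.upper (PySem.Str.slice symbol (some ((PySem.Str.len c : Int))) none))]
  rw [pv_remainderA, hkn]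
  rfl

-- one crypto matches A's loop test iff it is the (unique) all-but-last-3 prefix
-- with a known quote as the last 3 chars
lemma pv_matchA_iff (symbol c : String) :
    (PySem.Str.startswith (PySem.Str.upper symbol) c = true ∧
     PySem.Str.upper (PySem.Str.slice symbol (some ((PySem.Str.len c : Int))) none) ∈ pvQuotes)
    ↔ (3 ≤ (pvU symbol).length ∧ c = String.ofList (pvT symbol) ∧
       String.ofList (pvD symbol) ∈ pvQuotes) := by
  constructor
  · rintro ⟨hs, hr⟩
    rw [PySem.Str.startswith_eq] at hs
    have hpre : c.toList <+: pvU symbol := (PySem.Chars.startswith_iff _ _).1 hs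
    have hk : c.toList.length ≤ (pvU symbol).length := hpre.length_le
    have hlen3 : ((pvU symbol).drop c.toList.length).length = 3 := by
      rw [← pv_remainderA]; exact pv_quotes_len hr
    rw [List.length_drop] at hlen3
    have h3 : 3 ≤ (pvU symbol).length := by omega
    have hkn : c.toList.length = (pvU symbol).length - 3 := by omega
    have hct : c = String.ofList (pvT symbol) := by
      rw [← String.ofList_toList (s := c)]
      have := List.prefix_iff_eq_take.1 hpre
      rw [pvT, ← hkn, ← this]
    refine ⟨h3, hct, ?_⟩
    rw [← pv_remainder_eq symbol c hkn]
    exact hr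
  · rintro ⟨h3, hct, hdq⟩
    have hctl : c.toList = pvT symbol := by rw [hct, String.toList_ofList]
    have hkn : c.toList.length = (pvU symbol).length - 3 := by
      rw [hctl, pvT, List.length_take]; omega
    have hpre : c.toList <+: pvU symbol := by rw [hctl, pvT]; exact List.take_prefix _ _
    refine ⟨?_, ?_⟩
    · rw [PySem.Str.startswith_eq]; exact (PySem.Chars.startswith_iff _ _).2 hpre
    · rw [pv_remainder_eq symbol c hkn]; exact hdq

lemma pvLoopA_char (symbol : String) (l : List String) :
    pvLoopA symbol l =
      if 3 ≤ (pvU symbol).length ∧ String.ofList (pvT symbol) ∈ l ∧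
          String.ofList (pvD symbol) ∈ pvQuotes
      then some (String.ofList (pvT symbol), String.ofList (pvD symbol)) else none := by
  induction l with
  | nil => simp [pvLoopA]
  | cons c rest ih =>
    by_cases hm : PySem.Str.startswith (PySem.Str.upper symbol) c = true ∧
        PySem.Str.upper (PySem.Str.slice symbol (some ((PySem.Str.len c : Int))) none) ∈ pvQuotes
    · obtain ⟨h3, hct, hdq⟩ := (pv_matchA_iff symbol c).1 hm
      have hkn : c.toList.length = (pvU symbol).length - 3 := by
        rw [hct, String.toList_ofList, pvT, List.length_take]; omega
      rw [pvLoopA, if_pos hm.1, if_pos hm.2,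
        if_pos ⟨h3, by rw [hct]; exact List.mem_cons_self, hdq⟩,
        ← hct, pv_remainder_eq symbol c hkn]
    · have hmem : (3 ≤ (pvU symbol).length ∧ String.ofList (pvT symbol) ∈ c :: rest ∧
          String.ofList (pvD symbol) ∈ pvQuotes) ↔
          (3 ≤ (pvU symbol).length ∧ String.ofList (pvT symbol) ∈ rest ∧
          String.ofList (pvD symbol) ∈ pvQuotes) := by
        constructor
        · rintro ⟨h3, hmm, hdq⟩
          rcases List.mem_cons.1 hmm with hcc | hr
          · exact absurd ((pv_matchA_iff symbol c).2 ⟨h3, hcc.symm, hdq⟩) hm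
          · exact ⟨h3, hr, hdq⟩
        · rintro ⟨h3, hr, hdq⟩; exact ⟨h3, List.mem_cons_of_mem _ hr, hdq⟩
      rw [pvLoopA]
      by_cases hs : PySem.Str.startswith (PySem.Str.upper symbol) c = true
      · have hr : ¬ (PySem.Str.upper (PySem.Str.slice symbol (some ((PySem.Str.len c : Int))) none)
            ∈ pvQuotes) := fun hr => hm ⟨hs, hr⟩
        rw [if_pos hs, if_neg hr, ih, if_congr hmem rfl rfl]
      · rw [if_neg hs, ih, if_congr hmem rfl rfl]

lemma pv_contains_iff (x : String) :
    PySem.Set.contains pvCryptoSet x = true ↔ x ∈ pvCryptos := by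
  simp only [pvCryptoSet, PySem.Set.contains_eq_listContains, List.contains_eq_mem,
    PySem.Set.mem_ofList, decide_eq_true_eq]

-- B's base upper[:-3] is the all-but-last-3 prefix of the upper-cased symbol
lemma pv_baseB (symbol : String) :
    PySem.Str.slice (PySem.Str.upper symbol) none (some (-3)) = String.ofList (pvT symbol) := by
  rw [← String.ofList_toList (s := PySem.Str.slice (PySem.Str.upper symbol) none (some (-3)))]
  rw [PySem.Str.toList_slice, PySem.Chars.slice_eq_listSlice,
    PySem.List.slice_to_neg_ofNat _ 3 (by omega)]
  rfl

-- B's quote upper[-3:] is the last-3 suffix of the upper-cased symbol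
lemma pv_quoteB (symbol : String) :
    PySem.Str.slice (PySem.Str.upper symbol) (some (-3)) none = String.ofList (pvD symbol) := by
  rw [← String.ofList_toList (s := PySem.Str.slice (PySem.Str.upper symbol) (some (-3)) none)]
  rw [PySem.Str.toList_slice, PySem.Chars.slice_eq_listSlice,
    PySem.List.slice_from_neg_ofNat _ 3 (by omega)]
  rfl

-- the last-3 suffix can only be a quote currency when the symbol has ≥ 3 chars
lemma pv_quote_forces_len (symbol : String)
    (h : String.ofList (pvD symbol) ∈ pvQuotes) : 3 ≤ (pvU symbol).length := by
  have := pv_quotes_len h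
  rw [String.toList_ofList, pvD, List.length_drop] at this
  omega

-- upper commutes with the fallback slices, and preserves length
lemma pv_fallback_to (symbol : String) :
    PySem.Str.slice (PySem.Str.upper symbol) none (some 3)
      = PySem.Str.upper (PySem.Str.slice symbol none (some 3)) := by
  rw [← String.ofList_toList (s := PySem.Str.slice (PySem.Str.upper symbol) none (some 3)),
      ← String.ofList_toList (s := PySem.Str.upper (PySem.Str.slice symbol none (some 3)))]
  simp only [PySem.Str.toList_slice, PySem.Chars.slice_eq_listSlice, PySem.Str.toList_upper]
  rw [show ((3 : Int) = ((3 : Nat) : Int)) from rfl, PySem.List.slice_to_natCast,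
    PySem.List.slice_to_natCast, pv_upper_take]

lemma pv_fallback_from (symbol : String) :
    PySem.Str.slice (PySem.Str.upper symbol) (some 3) none
      = PySem.Str.upper (PySem.Str.slice symbol (some 3) none) := by
  rw [← String.ofList_toList (s := PySem.Str.slice (PySem.Str.upper symbol) (some 3) none),
      ← String.ofList_toList (s := PySem.Str.upper (PySem.Str.slice symbol (some 3) none))]
  simp only [PySem.Str.toList_slice, PySem.Chars.slice_eq_listSlice, PySem.Str.toList_upper]
  rw [show ((3 : Int) = ((3 : Nat) : Int)) from rfl, PySem.List.slice_from_natCast,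
    PySem.List.slice_from_natCast, pv_upper_drop]

lemma pv_len_upper (symbol : String) :
    PySem.Str.len (PySem.Str.upper symbol) = PySem.Str.len symbol := by
  simp [PySem.Str.len_eq, PySem.Str.toList_upper, PySem.Chars.upper]

-- ===== VERDICT (by name: the statement is the Claim_ definition above) =====
theorem parse_crypto_symbol_py_spec : Claim_equal_parse_crypto_symbol_py := by
  intro symbol _
  unfold Spec_parse_crypto_symbol_py parse_crypto_symbol_py parse_crypto_symbol_py_alt
  dsimp only
  rw [pvLoopA_char, pv_baseB, pv_quoteB, pv_fallback_to, pv_fallback_from, pv_len_upper]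
  by_cases h0 : PySem.Set.contains pvCryptoSet (PySem.Str.upper symbol) = true
  · simp only [h0, if_true]
  · simp only [h0, Bool.false_eq_true, if_false]
    by_cases hc : 3 ≤ (pvU symbol).length ∧ String.ofList (pvT symbol) ∈ pvCryptos ∧
        String.ofList (pvD symbol) ∈ pvQuotes
    · have hb : (PySem.Set.contains pvCryptoSet (String.ofList (pvT symbol)) &&
          ["USD", "EUR", "GBP", "JPY"].contains (String.ofList (pvD symbol))) = true := by
        rw [Bool.and_eq_true, List.contains_eq_mem, decide_eq_true_eq]
        exact ⟨(pv_contains_iff _).2 hc.2.1, hc.2.2⟩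
      rw [if_pos hc, if_pos hb]
    · have hb : ¬ ((PySem.Set.contains pvCryptoSet (String.ofList (pvT symbol)) &&
          ["USD", "EUR", "GBP", "JPY"].contains (String.ofList (pvD symbol))) = true) := by
        rw [Bool.and_eq_true, List.contains_eq_mem, decide_eq_true_eq]
        rintro ⟨h1, h2⟩
        exact hc ⟨pv_quote_forces_len symbol h2, (pv_contains_iff _).1 h1, h2⟩
      rw [if_neg hc, if_neg hb]
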